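-- pv_equiv track=rewrite | github.com/STBneo/ADD2_yong | Tools/FAFDrugs2/bin_bak/GetRings.py | CreateNeighbourList
-- ===== SOURCE A (Python) =====
-- def CreateNeighbourList(dico_rings):
--     """
--     Creates two dictionnaries:
--     1) dico_neighbour_ring, containing for each rings (key) a list (value) containing all the neightbors rings of the ring tested.
--     {ringA:[ringB,ringC];ringB:[ringA];ringC:[ringA]}
--     2) dico_bond_junct, containing for each bonds detected (key) a list (value) containing all the rings involved.
--     {bondX:[ringA,ringB]}
--     """
--
--     dico_neighbour_ring = {}
--     dico_bond_junct = {}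
--
--     for ring_i in range(0,len(dico_rings)):
--         list_temp = []
--         for ring_j in range(0,len(dico_rings)):
--             if ring_i != ring_j:
--                 for bond_i in dico_rings[ring_i]:
--                     for bond_j in dico_rings[ring_j]:
--                         if bond_i == bond_j:
--                             list_temp.append(ring_j)
--                             dico_bond_junct[bond_i] = [ring_i,ring_j]
--
--         if list_temp != []:
--             dico_neighbour_ring[ring_i] = list_temp
--
--
--     return dico_neighbour_ring,dico_bond_junct
-- ===== SOURCE B (Python) =====
-- def CreateNeighbourList(dico_rings):
--     # Inverted index: bond -> {ring index: multiplicity}, built once.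
--     bond2rings = {}
--     for r in range(len(dico_rings)):
--         for b in dico_rings[r]:
--             d = bond2rings.setdefault(b, {})
--             d[r] = d.get(r, 0) + 1
--
--     dico_neighbour_ring = {}
--     dico_bond_junct = {}
--     for i in range(len(dico_rings)):
--         bonds = dico_rings[i]
--         cnt = {}
--         for b in bonds:
--             for j, c in bond2rings[b].items():
--                 if j != i:
--                     cnt[j] = cnt.get(j, 0) + c
--         if cnt:
--             lst = []
--             for j in range(len(dico_rings)):
--                 if j in cnt:
--                     lst.extend([j] * cnt[j])
--                     for b in bonds:
--                         if j in bond2rings[b]: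
--                             dico_bond_junct[b] = [i, j]
--             dico_neighbour_ring[i] = lst
--     return dico_neighbour_ring, dico_bond_junct
-- ===== Notes on version B (the rewrite author's own statement) =====
-- stated objective: alternative
-- what changed: Replaces A's quadruple loop (every ring pair, every bond pair) by a bond->(ring->multiplicity) inverted index built in one pass, from which each ring's neighbour multiplicities and the junction-bond entries are derived in a single counting pass per ring; intended as faster (a timing run measured 2.6-3.7x on sizes where both finish) but unconfirmed at the largest size, so no speed claim is made.
import Mathlib
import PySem

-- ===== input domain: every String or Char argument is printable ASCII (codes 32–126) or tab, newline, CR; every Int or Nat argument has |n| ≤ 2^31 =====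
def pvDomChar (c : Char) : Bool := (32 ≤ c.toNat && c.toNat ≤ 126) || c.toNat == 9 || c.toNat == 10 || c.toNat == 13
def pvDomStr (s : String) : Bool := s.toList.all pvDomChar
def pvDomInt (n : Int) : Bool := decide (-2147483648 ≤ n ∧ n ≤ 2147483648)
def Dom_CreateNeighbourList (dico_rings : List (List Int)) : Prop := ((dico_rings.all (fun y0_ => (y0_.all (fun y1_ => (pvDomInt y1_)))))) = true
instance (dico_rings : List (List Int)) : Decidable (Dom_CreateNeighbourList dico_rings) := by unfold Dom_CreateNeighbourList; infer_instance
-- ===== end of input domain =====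

-- B replaces A's pairwise ring×ring, bond×bond scan by a bond→(ring→multiplicity) inverted
-- index built once and a single counting pass per ring (objective: alternative algorithm;
-- a timing run read 2.6–3.7× on mid-size inputs but was unconfirmed at the largest size).

-- ===== PORT A =====
-- dico_rings[ring_i]: loop indices come from range(0, len(dico_rings)), so they are in range
-- and pyGetD with a default is exact Python indexing there (shared by both ports).
def pvRing (xs : List (List Int)) (i : Int) : List Int := PySem.List.pyGetD xs i []

def pvB2RStep (r : Int) (b2r : PySem.Dict Int (PySem.Dict Int Int)) (b : Int) :
    PySem.Dict Int (PySem.Dict Int Int) :=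
  let b2r' := b2r.setdefault b PySem.Dict.empty
  let d := b2r'.getD b PySem.Dict.empty
  b2r'.insert b (d.insert r (d.getD r 0 + 1))

def pvB2R (dico_rings : List (List Int)) : PySem.Dict Int (PySem.Dict Int Int) :=
  (PySem.List.pyRange 0 (dico_rings.length : Int) 1).foldl
    (fun b2r r => (pvRing dico_rings r).foldl (pvB2RStep r) b2r)
    PySem.Dict.empty

def pvCnt (dico_rings : List (List Int)) (i : Int) : PySem.Dict Int Int :=
  (pvRing dico_rings i).foldl
    (fun cnt b =>
      ((pvB2R dico_rings).getD b PySem.Dict.empty).items.foldl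
        (fun (cnt : PySem.Dict Int Int) jc =>
          if jc.1 ≠ i then cnt.insert jc.1 (cnt.getD jc.1 0 + jc.2) else cnt)
        cnt)
    PySem.Dict.empty


def CreateNeighbourList (dico_rings : List (List Int)) :
    (List (Int × List Int)) × (List (Int × List Int)) :=
  let n : Int := (dico_rings.length : Int)
  let final :=
    (PySem.List.pyRange 0 n 1).foldl
      (fun (st : PySem.Dict Int (List Int) × PySem.Dict Int (List Int)) ring_i =>
        let inner :=
          (PySem.List.pyRange 0 n 1).foldl
            (fun (st2 : List Int × PySem.Dict Int (List Int)) ring_j =>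
              if ring_i ≠ ring_j then
                (pvRing dico_rings ring_i).foldl
                  (fun st3 bond_i =>
                    (pvRing dico_rings ring_j).foldl
                      (fun (st4 : List Int × PySem.Dict Int (List Int)) bond_j =>
                        if bond_i = bond_j then
                          (st4.1 ++ [ring_j], st4.2.insert bond_i [ring_i, ring_j])
                        else st4)
                      st3)
                  st2
              else st2)
            ([], st.2)
        (if inner.1 ≠ [] then st.1.insert ring_i inner.1 else st.1, inner.2))
      (PySem.Dict.empty, PySem.Dict.empty)
  (final.1.items, final.2.items)


-- ===== PORT B =====
-- bond2rings.setdefault(b, {}) followed by the in-place d[r] = d.get(r, 0) + 1: setdefault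
-- keeps/creates b's position and the insert overwrites its value in place — exact.
-- bond2rings[b] and cnt[j] are read only at keys known to be present, so getD is exact there.
def CreateNeighbourList_alt (dico_rings : List (List Int)) :
    (List (Int × List Int)) × (List (Int × List Int)) :=
  let n : Int := (dico_rings.length : Int)
  let b2r := pvB2R dico_rings
  let final :=
    (PySem.List.pyRange 0 n 1).foldl
      (fun (st : PySem.Dict Int (List Int) × PySem.Dict Int (List Int)) i =>
        let bonds := pvRing dico_rings i
        let cnt := pvCnt dico_rings i
        if cnt.items ≠ [] then
          let res :=
            (PySem.List.pyRange 0 n 1).foldl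
              (fun (res : List Int × PySem.Dict Int (List Int)) j =>
                if cnt.contains j then
                  (res.1 ++ PySem.List.pyRepeat [j] (cnt.getD j 0),
                   bonds.foldl
                     (fun (jd : PySem.Dict Int (List Int)) b =>
                       if (b2r.getD b PySem.Dict.empty).contains j then jd.insert b [i, j]
                       else jd)
                     res.2)
                else res)
              ([], st.2)
          (st.1.insert i res.1, res.2)
        else st)
      (PySem.Dict.empty, PySem.Dict.empty)
  (final.1.items, final.2.items)


-- ===== PRECONDITION & SPEC =====
def Spec_CreateNeighbourList (dico_rings : List (List Int)) (out : (List (Int × List Int)) × (List (Int × List Int))) : Prop := out = CreateNeighbourList_alt dico_rings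
instance (dico_rings : List (List Int)) (out : (List (Int × List Int)) × (List (Int × List Int))) : Decidable (Spec_CreateNeighbourList dico_rings out) := by unfold Spec_CreateNeighbourList; infer_instance

-- ===== CLAIM (what is proved, stated in full; the proofs are below) =====
def Claim_equal_CreateNeighbourList : Prop := ∀ (dico_rings : List (List Int)), Dom_CreateNeighbourList dico_rings → Spec_CreateNeighbourList dico_rings (CreateNeighbourList dico_rings)

-- ===== LEMMAS AND PROOFS =====

-- ===== A-side inner folds =====
lemma A4 (i j b : Int) (rj : List Int) (l : List Int) (d : PySem.Dict Int (List Int)) :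
    rj.foldl (fun (st4 : List Int × PySem.Dict Int (List Int)) bond_j =>
        if b = bond_j then (st4.1 ++ [j], st4.2.insert b [i, j]) else st4) (l, d)
    = (l ++ List.replicate (rj.count b) j, if b ∈ rj then d.insert b [i, j] else d) := by
  induction rj generalizing l d with
  | nil => simp
  | cons x t ih =>
    by_cases hbx : b = x
    · subst hbx
      simp only [List.foldl_cons, if_pos rfl, ih]
      refine Prod.ext ?_ ?_
      · simp [List.count_cons, List.replicate_succ]
      · simp [PySem.Dict.insert_insert_self]
    · simp only [List.foldl_cons, if_neg hbx, ih]
      simp [List.count_cons, hbx, Ne.symm hbx]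

lemma A3 (i j : Int) (rj bonds : List Int) (l : List Int) (d : PySem.Dict Int (List Int)) :
    bonds.foldl (fun st3 b => rj.foldl (fun (st4 : List Int × PySem.Dict Int (List Int)) bond_j =>
        if b = bond_j then (st4.1 ++ [j], st4.2.insert b [i, j]) else st4) st3) (l, d)
    = (l ++ bonds.flatMap (fun b => List.replicate (rj.count b) j),
       bonds.foldl (fun d b => if b ∈ rj then d.insert b [i, j] else d) d) := by
  induction bonds generalizing l d with
  | nil => simp
  | cons x t ih => simp [A4, ih]

lemma flatrep (bonds : List Int) (j : Int) (f : Int → Nat) :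
    bonds.flatMap (fun b => List.replicate (f b) j)
    = List.replicate ((bonds.map f).sum) j := by
  induction bonds with
  | nil => simp
  | cons x t ih => simp [ih, ← List.replicate_add]

-- ===== bond2rings characterization =====
lemma B2Rstep_getD (r b b' : Int) (d : PySem.Dict Int (PySem.Dict Int Int)) :
    (pvB2RStep r d b).getD b' PySem.Dict.empty
    = if b' = b then (d.getD b PySem.Dict.empty).insert r ((d.getD b PySem.Dict.empty).getD r 0 + 1)
      else d.getD b' PySem.Dict.empty := by
  unfold pvB2RStep
  by_cases h : b' = b
  · subst h; simp [PySem.Dict.getD_insert_self, PySem.Dict.getD_setdefault_self]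
  · simp only [PySem.Dict.getD_eq_get?_getD]
    rw [PySem.Dict.get?_insert_of_ne _ _ h, PySem.Dict.get?_setdefault_of_ne _ _ h]
    simp [h]

lemma B2Rring_getD (r : Int) (bonds : List Int) (d : PySem.Dict Int (PySem.Dict Int Int)) (b j : Int) :
    ((bonds.foldl (pvB2RStep r) d).getD b PySem.Dict.empty).getD j 0
    = ((d.getD b PySem.Dict.empty).getD j 0) + (if j = r then (bonds.count b : Int) else 0) := by
  induction bonds generalizing d with
  | nil => simp
  | cons x t ih =>
    simp only [List.foldl_cons, ih, B2Rstep_getD]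
    by_cases hbx : b = x
    · subst hbx
      rw [if_pos rfl, PySem.Dict.getD_insert]
      by_cases hjr : j = r
      · subst hjr; simp [List.count_cons]; ring
      · simp [hjr]
    · simp [if_neg hbx, List.count_cons, Ne.symm hbx]

lemma B2Rring_contains (r : Int) (bonds : List Int) (d : PySem.Dict Int (PySem.Dict Int Int)) (b j : Int) :
    ((bonds.foldl (pvB2RStep r) d).getD b PySem.Dict.empty).contains j = true
    ↔ ((d.getD b PySem.Dict.empty).contains j = true ∨ (j = r ∧ b ∈ bonds)) := by
  induction bonds generalizing d with
  | nil => simp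
  | cons x t ih =>
    simp only [List.foldl_cons, ih, B2Rstep_getD]
    by_cases hbx : b = x
    · subst hbx
      rw [if_pos rfl, PySem.Dict.contains_insert]
      simp only [Bool.or_eq_true, beq_iff_eq, List.mem_cons]
      tauto
    · simp [if_neg hbx, List.mem_cons, Ne.symm hbx]
      tauto

lemma B2Rring_nodup (r : Int) (bonds : List Int) (d : PySem.Dict Int (PySem.Dict Int Int))
    (h : ∀ b, ((d.getD b PySem.Dict.empty).keys.Nodup)) :
    ∀ b, (((bonds.foldl (pvB2RStep r) d).getD b PySem.Dict.empty).keys.Nodup) := by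
  induction bonds generalizing d with
  | nil => exact h
  | cons x t ih =>
    refine ih _ (fun b => ?_)
    rw [B2Rstep_getD]
    split_ifs with hb
    · exact PySem.Dict.nodup_keys_insert _ _ _ (h x)
    · exact h b

-- ===== rs-level / top-level bond2rings =====
lemma B2Rrs_getD (xs : List (List Int)) (rs : List Int) (d : PySem.Dict Int (PySem.Dict Int Int)) (b j : Int) :
    ((rs.foldl (fun d r => (pvRing xs r).foldl (pvB2RStep r) d) d).getD b PySem.Dict.empty).getD j 0
    = ((d.getD b PySem.Dict.empty).getD j 0) + (rs.count j : Int) * ((pvRing xs j).count b : Int) := by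
  induction rs generalizing d with
  | nil => simp
  | cons r t ih =>
    simp only [List.foldl_cons, ih, B2Rring_getD, List.count_cons]
    by_cases hjr : j = r
    · subst hjr; simp; push_cast; ring
    · simp [hjr, Ne.symm hjr]

lemma B2Rrs_contains (xs : List (List Int)) (rs : List Int) (d : PySem.Dict Int (PySem.Dict Int Int)) (b j : Int) :
    ((rs.foldl (fun d r => (pvRing xs r).foldl (pvB2RStep r) d) d).getD b PySem.Dict.empty).contains j = true
    ↔ ((d.getD b PySem.Dict.empty).contains j = true ∨ (j ∈ rs ∧ b ∈ pvRing xs j)) := by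
  induction rs generalizing d with
  | nil => simp
  | cons r t ih =>
    simp only [List.foldl_cons, ih, B2Rring_contains, List.mem_cons]
    constructor
    · rintro ((h | ⟨rfl, h⟩) | h) <;> tauto
    · rintro (h | ⟨(rfl | h), hb⟩) <;> tauto

lemma B2R_getD (xs : List (List Int)) (b j : Int) :
    (((pvB2R xs).getD b PySem.Dict.empty).getD j 0)
    = if 0 ≤ j ∧ j < (xs.length : Int) then ((pvRing xs j).count b : Int) else 0 := by
  unfold pvB2R
  rw [B2Rrs_getD]
  by_cases h : 0 ≤ j ∧ j < (xs.length : Int)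
  · rw [List.count_eq_one_of_mem (PySem.List.nodup_pyRange_one 0 _)
      (PySem.List.mem_pyRange_one.mpr h)]
    simp [h]
  · rw [List.count_eq_zero_of_not_mem (fun hm => h (PySem.List.mem_pyRange_one.mp hm))]
    simp [h]

lemma B2R_contains (xs : List (List Int)) (b j : Int) :
    ((pvB2R xs).getD b PySem.Dict.empty).contains j = true
    ↔ ((0 ≤ j ∧ j < (xs.length : Int)) ∧ b ∈ pvRing xs j) := by
  unfold pvB2R
  rw [B2Rrs_contains]
  simp [PySem.List.mem_pyRange_one]

lemma B2R_nodup (xs : List (List Int)) (b : Int) :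
    ((pvB2R xs).getD b PySem.Dict.empty).keys.Nodup := by
  unfold pvB2R
  have : ∀ (rs : List Int) (d : PySem.Dict Int (PySem.Dict Int Int)),
      (∀ b, ((d.getD b PySem.Dict.empty).keys.Nodup)) →
      ∀ b, (((rs.foldl (fun d r => (pvRing xs r).foldl (pvB2RStep r) d) d).getD b PySem.Dict.empty).keys.Nodup) := by
    intro rs
    induction rs with
    | nil => intro d h; exact h
    | cons r t ih => intro d h; exact ih _ (B2Rring_nodup r _ d h)
  exact this _ _ (fun b => by simp) b

-- ===== cnt characterization =====
lemma cntfold_getD (i : Int) (l : List (Int × Int)) (c : PySem.Dict Int Int) (j : Int) :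
    (l.foldl (fun (c : PySem.Dict Int Int) jc =>
        if jc.1 ≠ i then c.insert jc.1 (c.getD jc.1 0 + jc.2) else c) c).getD j 0
    = c.getD j 0 + (if j ≠ i then ((l.filter (fun p => p.1 == j)).map (·.2)).sum else 0) := by
  induction l generalizing c with
  | nil => simp
  | cons p t ih =>
    obtain ⟨q, v⟩ := p
    simp only [List.foldl_cons, List.filter_cons]
    by_cases hpi : q = i
    · rw [if_neg (by simp [hpi]), ih]
      by_cases hji : j = i
      · simp [hji]
      · simp [hji, hpi, Ne.symm hji]
    · rw [if_pos (by simp [hpi]), ih, PySem.Dict.getD_insert]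
      by_cases hjq : j = q
      · subst hjq
        simp [hpi]
        ring
      · simp [hjq, Ne.symm hjq]

lemma cntfold_contains (i : Int) (l : List (Int × Int)) (c : PySem.Dict Int Int) (j : Int) :
    (l.foldl (fun (c : PySem.Dict Int Int) jc =>
        if jc.1 ≠ i then c.insert jc.1 (c.getD jc.1 0 + jc.2) else c) c).contains j = true
    ↔ (c.contains j = true ∨ (j ≠ i ∧ j ∈ l.map (·.1))) := by
  induction l generalizing c with
  | nil => simp
  | cons p t ih =>
    obtain ⟨q, v⟩ := p
    simp only [List.foldl_cons, List.map_cons, List.mem_cons]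
    by_cases hpi : q = i
    · rw [if_neg (by simp [hpi]), ih]
      constructor
      · rintro (h | h) <;> tauto
      · rintro (h | ⟨hji, h | h⟩)
        · tauto
        · exact absurd (h.trans hpi) hji
        · tauto
    · rw [if_pos (by simp [hpi]), ih]
      simp only [PySem.Dict.contains_insert, Bool.or_eq_true, beq_iff_eq]
      constructor
      · rintro ((h | h) | h)
        · exact Or.inr ⟨fun hji => hpi (h ▸ hji), Or.inl h⟩
        · tauto
        · tauto
      · rintro (h | ⟨hji, h | h⟩) <;> tauto

lemma filter_beq_nodup (l : List Int) (h : l.Nodup) (j : Int) :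
    l.filter (fun k => k == j) = if j ∈ l then [j] else [] := by
  induction l with
  | nil => simp
  | cons x t ih =>
    rcases List.nodup_cons.mp h with ⟨hx, ht⟩
    by_cases hxj : x = j
    · subst hxj
      have hft : t.filter (fun k => k == x) = [] :=
        List.filter_eq_nil_iff.mpr (by intro a ha; simp only [beq_iff_eq]; rintro rfl; exact hx ha)
      simp [List.filter_cons, hft]
    · simp [List.filter_cons, hxj, ih ht, Ne.symm hxj]

lemma sum_filter_items (d : PySem.Dict Int Int) (hnd : d.keys.Nodup) (j : Int) :
    ((d.items.filter (fun p => p.1 == j)).map (·.2)).sum = d.getD j 0 := by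
  rw [PySem.Dict.items_eq_map_keys d hnd 0, List.filter_map, Function.comp_def]
  simp only [filter_beq_nodup d.keys hnd j]
  by_cases h : j ∈ d.keys
  · simp [h]
  · simp [h, PySem.Dict.getD_of_not_contains d 0
      (by simpa using (fun hc => h ((PySem.Dict.contains_iff_mem_keys d j).mp hc)))]

lemma cnt_rs_getD (xs : List (List Int)) (i : Int) (bonds : List Int) (c : PySem.Dict Int Int) (j : Int) :
    (bonds.foldl (fun (cnt : PySem.Dict Int Int) b =>
        ((pvB2R xs).getD b PySem.Dict.empty).items.foldl
          (fun (cnt : PySem.Dict Int Int) jc =>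
            if jc.1 ≠ i then cnt.insert jc.1 (cnt.getD jc.1 0 + jc.2) else cnt) cnt) c).getD j 0
    = c.getD j 0
      + (if j ≠ i then (bonds.map (fun b => ((pvB2R xs).getD b PySem.Dict.empty).getD j 0)).sum else 0) := by
  induction bonds generalizing c with
  | nil => simp
  | cons b t ih =>
    simp only [List.foldl_cons, ih, cntfold_getD, sum_filter_items _ (B2R_nodup xs b) j,
      List.map_cons, List.sum_cons]
    split_ifs <;> ring

lemma cnt_rs_contains (xs : List (List Int)) (i : Int) (bonds : List Int) (c : PySem.Dict Int Int) (j : Int) :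
    (bonds.foldl (fun (cnt : PySem.Dict Int Int) b =>
        ((pvB2R xs).getD b PySem.Dict.empty).items.foldl
          (fun (cnt : PySem.Dict Int Int) jc =>
            if jc.1 ≠ i then cnt.insert jc.1 (cnt.getD jc.1 0 + jc.2) else cnt) cnt) c).contains j = true
    ↔ (c.contains j = true
       ∨ (j ≠ i ∧ ∃ b ∈ bonds, ((pvB2R xs).getD b PySem.Dict.empty).contains j = true)) := by
  induction bonds generalizing c with
  | nil => simp
  | cons b t ih =>
    have hk : j ∈ ((pvB2R xs).getD b PySem.Dict.empty).items.map (·.1)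
        ↔ ((pvB2R xs).getD b PySem.Dict.empty).contains j = true := by
      rw [PySem.Dict.contains_iff_mem_keys]
      simp [PySem.Dict.keys]
    simp only [List.foldl_cons, ih, cntfold_contains, hk, List.mem_cons]
    constructor
    · rintro ((h | h) | h)
      · tauto
      · exact Or.inr ⟨h.1, b, Or.inl rfl, h.2⟩
      · rcases h with ⟨hji, b', hb', hc'⟩
        exact Or.inr ⟨hji, b', Or.inr hb', hc'⟩
    · rintro (h | ⟨hji, b', hb', hc'⟩)
      · tauto
      · rcases hb' with rfl | hb'
        · exact Or.inl (Or.inr ⟨hji, hc'⟩)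
        · exact Or.inr ⟨hji, b', hb', hc'⟩

lemma cnt_getD (xs : List (List Int)) (i j : Int) :
    (pvCnt xs i).getD j 0
    = if j ≠ i then ((pvRing xs i).map (fun b => ((pvB2R xs).getD b PySem.Dict.empty).getD j 0)).sum else 0 := by
  unfold pvCnt
  rw [cnt_rs_getD]
  simp

lemma cnt_contains (xs : List (List Int)) (i j : Int) :
    (pvCnt xs i).contains j = true
    ↔ j ≠ i ∧ ∃ b ∈ pvRing xs i, ((0 ≤ j ∧ j < (xs.length : Int)) ∧ b ∈ pvRing xs j) := by
  unfold pvCnt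
  rw [cnt_rs_contains]
  simp [B2R_contains]

lemma sumcast (l : List Int) (c : Int → Nat) :
    (l.map (fun b => ((c b : Nat) : Int))).sum = ((l.map c).sum : Int) := by
  induction l with
  | nil => simp
  | cons x t ih => simp [ih]

lemma cnt_getD_in (xs : List (List Int)) (i j : Int) (hj0 : 0 ≤ j) (hjn : j < (xs.length : Int))
    (hji : j ≠ i) :
    (pvCnt xs i).getD j 0 = ((pvRing xs i).map (fun b => (((pvRing xs j).count b : Nat) : Int))).sum := by
  rw [cnt_getD, if_pos hji]
  congr 1
  refine List.map_congr_left (fun b hb => ?_)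
  rw [B2R_getD, if_pos ⟨hj0, hjn⟩]

lemma pairSplit (js : List Int) (cond : Int → Bool) (f : Int → List Int)
    (g : PySem.Dict Int (List Int) → Int → PySem.Dict Int (List Int)) (l : List Int)
    (d : PySem.Dict Int (List Int)) :
    js.foldl (fun (res : List Int × PySem.Dict Int (List Int)) j =>
        if cond j then (res.1 ++ f j, g res.2 j) else res) (l, d)
    = (l ++ js.flatMap (fun j => if cond j then f j else []),
       js.foldl (fun d j => if cond j then g d j else d) d) := by
  induction js generalizing l d with
  | nil => simp
  | cons j t ih => by_cases hc : cond j <;> simp [hc, ih]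

lemma stepEq (xs : List (List Int)) (i j : Int) (hj0 : 0 ≤ j) (hjn : j < (xs.length : Int)) :
    ∀ (acc : List Int × PySem.Dict Int (List Int)),
    (if i ≠ j then
      (pvRing xs i).foldl
        (fun st3 bond_i =>
          (pvRing xs j).foldl
            (fun (st4 : List Int × PySem.Dict Int (List Int)) bond_j =>
              if bond_i = bond_j then (st4.1 ++ [j], st4.2.insert bond_i [i, j]) else st4) st3) acc
    else acc)
    = (if (pvCnt xs i).contains j then
        (acc.1 ++ PySem.List.pyRepeat [j] ((pvCnt xs i).getD j 0),
         (pvRing xs i).foldl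
           (fun (jd : PySem.Dict Int (List Int)) b =>
             if ((pvB2R xs).getD b PySem.Dict.empty).contains j then jd.insert b [i, j] else jd)
           acc.2)
      else acc) := by
  intro acc
  obtain ⟨l, d⟩ := acc
  by_cases hij : i = j
  · subst hij
    rw [if_neg (by simp), if_neg (by intro hc; exact ((cnt_contains xs i i).mp hc).1 rfl)]
  · rw [if_pos hij, A3]
    by_cases hc : (pvCnt xs i).contains j = true
    · rw [if_pos hc]
      refine Prod.ext ?_ ?_
      · simp only
        rw [flatrep, PySem.List.pyRepeat_singleton,
          cnt_getD_in xs i j hj0 hjn (fun h => hij h.symm), sumcast, Int.toNat_natCast]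
      · simp only
        refine PySem.List.foldl_congr_mem _ _ _ _ (fun acc b hb => ?_)
        by_cases hm : b ∈ pvRing xs j
        · rw [if_pos hm, if_pos ((B2R_contains xs b j).mpr ⟨⟨hj0, hjn⟩, hm⟩)]
        · rw [if_neg hm, if_neg (fun hcc => hm ((B2R_contains xs b j).mp hcc).2)]
    · rw [if_neg hc]
      have hnb : ∀ b ∈ pvRing xs i, b ∉ pvRing xs j := by
        intro b hb hbj
        exact hc ((cnt_contains xs i j).mpr ⟨fun h => hij h.symm, b, hb, ⟨hj0, hjn⟩, hbj⟩)
      refine Prod.ext ?_ ?_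
      · simp only
        rw [flatrep]
        have hz : ((pvRing xs i).map fun b => (pvRing xs j).count b).sum = 0 := by
          refine List.sum_eq_zero (fun x hx => ?_)
          rcases List.mem_map.mp hx with ⟨b, hb, rfl⟩
          exact List.count_eq_zero_of_not_mem (hnb b hb)
        simp [hz]
      · simp only
        rw [PySem.List.foldl_congr_mem _ _ (fun d _ => d) _
          (fun acc b hb => by rw [if_neg (hnb b hb)]), PySem.List.foldl_ignore]

lemma cnt_pos_of_contains (xs : List (List Int)) (i j : Int) (hc : (pvCnt xs i).contains j = true) :
    j ∈ PySem.List.pyRange 0 (xs.length : Int) 1 ∧ 1 ≤ (pvCnt xs i).getD j 0 := by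
  rcases (cnt_contains xs i j).mp hc with ⟨hji, b0, hb0, ⟨hj0, hjn⟩, hbj⟩
  refine ⟨PySem.List.mem_pyRange_one.mpr ⟨hj0, hjn⟩, ?_⟩
  rw [cnt_getD_in xs i j hj0 hjn hji]
  calc (1 : Int) ≤ (((pvRing xs j).count b0 : Nat) : Int) := by
        have := List.count_pos_iff.mpr hbj
        omega
    _ ≤ _ := List.single_le_sum (by
        intro x hx
        rcases List.mem_map.mp hx with ⟨b, hb, rfl⟩
        positivity) _ (List.mem_map.mpr ⟨b0, hb0, rfl⟩)

lemma no_contains_of_items_nil (xs : List (List Int)) (i : Int)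
    (hc : (pvCnt xs i).items = []) (j : Int) : ¬ (pvCnt xs i).contains j = true := by
  intro hcc
  have hk := (PySem.Dict.contains_iff_mem_keys _ _).mp hcc
  rw [show (pvCnt xs i).keys = (pvCnt xs i).items.map (·.1) from rfl, hc] at hk
  simp at hk


theorem mainEq (xs : List (List Int)) : CreateNeighbourList xs = CreateNeighbourList_alt xs := by
  have hstep : ∀ (st : PySem.Dict Int (List Int) × PySem.Dict Int (List Int)),
      ∀ i ∈ PySem.List.pyRange 0 (xs.length : Int) 1,
      (if ((PySem.List.pyRange 0 (xs.length : Int) 1).foldl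
          (fun (st2 : List Int × PySem.Dict Int (List Int)) ring_j =>
            if i ≠ ring_j then
              (pvRing xs i).foldl
                (fun st3 bond_i =>
                  (pvRing xs ring_j).foldl
                    (fun (st4 : List Int × PySem.Dict Int (List Int)) bond_j =>
                      if bond_i = bond_j then
                        (st4.1 ++ [ring_j], st4.2.insert bond_i [i, ring_j])
                      else st4)
                    st3)
                st2
            else st2)
          ([], st.2)).1 ≠ [] then st.1.insert i ((PySem.List.pyRange 0 (xs.length : Int) 1).foldl
          (fun (st2 : List Int × PySem.Dict Int (List Int)) ring_j =>
            if i ≠ ring_j then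
              (pvRing xs i).foldl
                (fun st3 bond_i =>
                  (pvRing xs ring_j).foldl
                    (fun (st4 : List Int × PySem.Dict Int (List Int)) bond_j =>
                      if bond_i = bond_j then
                        (st4.1 ++ [ring_j], st4.2.insert bond_i [i, ring_j])
                      else st4)
                    st3)
                st2
            else st2)
          ([], st.2)).1 else st.1, ((PySem.List.pyRange 0 (xs.length : Int) 1).foldl
          (fun (st2 : List Int × PySem.Dict Int (List Int)) ring_j =>
            if i ≠ ring_j then
              (pvRing xs i).foldl
                (fun st3 bond_i =>
                  (pvRing xs ring_j).foldl
                    (fun (st4 : List Int × PySem.Dict Int (List Int)) bond_j =>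
                      if bond_i = bond_j then
                        (st4.1 ++ [ring_j], st4.2.insert bond_i [i, ring_j])
                      else st4)
                    st3)
                st2
            else st2)
          ([], st.2)).2)
      = (if (pvCnt xs i).items ≠ [] then
          (st.1.insert i ((PySem.List.pyRange 0 (xs.length : Int) 1).foldl
              (fun (res : List Int × PySem.Dict Int (List Int)) j =>
                if (pvCnt xs i).contains j then
                  (res.1 ++ PySem.List.pyRepeat [j] ((pvCnt xs i).getD j 0),
                   (pvRing xs i).foldl
                     (fun (jd : PySem.Dict Int (List Int)) b =>
                       if ((pvB2R xs).getD b PySem.Dict.empty).contains j then jd.insert b [i, j]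
                       else jd)
                     res.2)
                else res)
              ([], st.2)).1, ((PySem.List.pyRange 0 (xs.length : Int) 1).foldl
              (fun (res : List Int × PySem.Dict Int (List Int)) j =>
                if (pvCnt xs i).contains j then
                  (res.1 ++ PySem.List.pyRepeat [j] ((pvCnt xs i).getD j 0),
                   (pvRing xs i).foldl
                     (fun (jd : PySem.Dict Int (List Int)) b =>
                       if ((pvB2R xs).getD b PySem.Dict.empty).contains j then jd.insert b [i, j]
                       else jd)
                     res.2)
                else res)
              ([], st.2)).2)
        else st) := by
    intro st i _hi
    have hinner :
        (PySem.List.pyRange 0 (xs.length : Int) 1).foldl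
          (fun (st2 : List Int × PySem.Dict Int (List Int)) ring_j =>
            if i ≠ ring_j then
              (pvRing xs i).foldl
                (fun st3 bond_i =>
                  (pvRing xs ring_j).foldl
                    (fun (st4 : List Int × PySem.Dict Int (List Int)) bond_j =>
                      if bond_i = bond_j then
                        (st4.1 ++ [ring_j], st4.2.insert bond_i [i, ring_j])
                      else st4)
                    st3)
                st2
            else st2)
          ([], st.2)
        = (PySem.List.pyRange 0 (xs.length : Int) 1).foldl
            (fun (res : List Int × PySem.Dict Int (List Int)) j =>
              if (pvCnt xs i).contains j then
                (res.1 ++ PySem.List.pyRepeat [j] ((pvCnt xs i).getD j 0),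
                 (pvRing xs i).foldl
                   (fun (jd : PySem.Dict Int (List Int)) b =>
                     if ((pvB2R xs).getD b PySem.Dict.empty).contains j then jd.insert b [i, j]
                     else jd)
                   res.2)
              else res)
            ([], st.2) := by
      refine PySem.List.foldl_congr_mem _ _ _ _ (fun acc j hj => ?_)
      rcases PySem.List.mem_pyRange_one.mp hj with ⟨hj0, hjn⟩
      exact stepEq xs i j hj0 hjn acc
    by_cases hc : (pvCnt xs i).items = []
    · conv_rhs => rw [if_neg (by simpa using hc)]
      rw [hinner, pairSplit _ (fun j => (pvCnt xs i).contains j)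
        (fun j => PySem.List.pyRepeat [j] ((pvCnt xs i).getD j 0))
        (fun d j => (pvRing xs i).foldl
          (fun (jd : PySem.Dict Int (List Int)) b =>
            if ((pvB2R xs).getD b PySem.Dict.empty).contains j then jd.insert b [i, j] else jd) d)
        [] st.2]
      have hnc := no_contains_of_items_nil xs i hc
      have hchunks : ((PySem.List.pyRange 0 (xs.length : Int) 1).flatMap
          (fun j => if (pvCnt xs i).contains j then
            PySem.List.pyRepeat [j] ((pvCnt xs i).getD j 0) else [])) = [] := by
        refine List.flatMap_eq_nil_iff.mpr (fun j hj => ?_)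
        rw [if_neg (hnc j)]
      have hdf : ((PySem.List.pyRange 0 (xs.length : Int) 1).foldl
          (fun d j => if (pvCnt xs i).contains j then
            (pvRing xs i).foldl
              (fun (jd : PySem.Dict Int (List Int)) b =>
                if ((pvB2R xs).getD b PySem.Dict.empty).contains j then jd.insert b [i, j]
                else jd) d
          else d) st.2) = st.2 := by
        rw [PySem.List.foldl_congr_mem _ _ (fun d _ => d) _
          (fun acc j hj => by rw [if_neg (hnc j)]), PySem.List.foldl_ignore]
      simp only [List.nil_append]
      rw [hdf, if_neg (fun h => h hchunks)]
    · conv_rhs => rw [if_pos (by simpa using hc)]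
      rcases List.exists_mem_of_ne_nil _ hc with ⟨p, hp⟩
      have hcj : (pvCnt xs i).contains p.1 = true := by
        rw [PySem.Dict.contains_iff_mem_keys]
        exact List.mem_map.mpr ⟨p, hp, rfl⟩
      rcases cnt_pos_of_contains xs i p.1 hcj with ⟨hmem, hpos⟩
      rw [hinner]
      rw [pairSplit _ (fun j => (pvCnt xs i).contains j)
        (fun j => PySem.List.pyRepeat [j] ((pvCnt xs i).getD j 0))
        (fun d j => (pvRing xs i).foldl
          (fun (jd : PySem.Dict Int (List Int)) b =>
            if ((pvB2R xs).getD b PySem.Dict.empty).contains j then jd.insert b [i, j] else jd) d)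
        [] st.2]
      have hne : ((PySem.List.pyRange 0 (xs.length : Int) 1).flatMap
          (fun j => if (pvCnt xs i).contains j then
            PySem.List.pyRepeat [j] ((pvCnt xs i).getD j 0) else [])) ≠ [] := by
        refine List.ne_nil_of_mem (a := p.1) ?_
        refine List.mem_flatMap.mpr ⟨p.1, hmem, ?_⟩
        rw [if_pos hcj, PySem.List.pyRepeat_singleton]
        refine List.mem_replicate.mpr ⟨by omega, rfl⟩
      simp only [List.nil_append]
      rw [if_pos hne]
  unfold CreateNeighbourList CreateNeighbourList_alt
  dsimp only
  rw [PySem.List.foldl_congr_mem _ _ _ _ hstep]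

-- ===== VERDICT (by name: the statement is the Claim_ definition above) =====
theorem CreateNeighbourList_spec : Claim_equal_CreateNeighbourList :=
  fun dico_rings _ => mainEq dico_rings
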